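-- pv_equiv track=rewrite | github.com/Maniachenko/sales_telegram_bot | backend/correct_names.py | generate_1li_combinations
-- ===== SOURCE A (Python) =====
-- import itertools
--
-- def generate_1li_combinations(word):
--     """
--     Generate all possible variants of a word by replacing 'i', 'l', '1' and other similar characters.
--
--     :param word: The input word for which variants will be generated.
--     :return: A list of generated word variants.
--     """
--     substitutions = {
--         'i': ['i', 'l', '1'], 'l': ['i', 'l', '1'], '1': ['i', 'l', '1'],
--         'r': ['r', 'j'], 'j': ['r', 'j'], 'e': ['e', 'o'], 'o': ['e', 'o']
--     }
--     positions = [i for i, char in enumerate(word) if char in substitutions]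
--
--     if not positions:
--         return [word]
--
--     variants = []
--     for variant in itertools.product(*[substitutions[word[pos]] for pos in positions]):
--         modified_word = list(word)
--         for idx, pos in enumerate(positions):
--             modified_word[pos] = variant[idx]
--         variants.append(''.join(modified_word))
--
--     return variants
-- ===== SOURCE B (Python) =====
-- def generate_1li_combinations(word):
--     """
--     Generate all possible variants of a word by replacing 'i', 'l', '1' and other similar characters.
--
--     :param word: The input word for which variants will be generated.
--     :return: A list of generated word variants.
--     """
--     substitutions = {
--         'i': ['i', 'l', '1'], 'l': ['i', 'l', '1'], '1': ['i', 'l', '1'],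
--         'r': ['r', 'j'], 'j': ['r', 'j'], 'e': ['e', 'o'], 'o': ['e', 'o']
--     }
--     acc = ['']
--     for c in word:
--         opts = substitutions.get(c, [c])
--         acc = [p + s for p in acc for s in opts]
--     return acc
-- ===== Notes on version B (the rewrite author's own statement) =====
-- stated objective: simpler
-- what changed: Replaced the positions+itertools.product machinery (collect substitutable indices, take a cartesian product of their option lists, rebuild each word by index assignment) with a single left-to-right fold that extends a list of partial prefixes character by character.
import Mathlib
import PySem

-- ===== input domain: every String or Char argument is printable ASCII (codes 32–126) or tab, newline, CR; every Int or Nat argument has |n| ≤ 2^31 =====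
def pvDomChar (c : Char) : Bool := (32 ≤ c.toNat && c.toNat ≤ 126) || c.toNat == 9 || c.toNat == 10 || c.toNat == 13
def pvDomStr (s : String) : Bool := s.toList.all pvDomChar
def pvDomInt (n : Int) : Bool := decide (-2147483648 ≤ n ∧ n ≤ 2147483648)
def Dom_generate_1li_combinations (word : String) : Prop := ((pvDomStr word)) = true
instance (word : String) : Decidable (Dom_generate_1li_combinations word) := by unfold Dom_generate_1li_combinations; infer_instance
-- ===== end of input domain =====

-- B replaces the positions + itertools.product machinery with one left-to-right fold
-- extending a list of partial prefixes character by character (objective: simpler).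

-- ===== PORT A =====
-- the literal `substitutions` dict, as a lookup (none = key absent)
def pvSubs? (c : Char) : Option (List Char) :=
  if c = 'i' ∨ c = 'l' ∨ c = '1' then some ['i', 'l', '1']
  else if c = 'r' ∨ c = 'j' then some ['r', 'j']
  else if c = 'e' ∨ c = 'o' then some ['e', 'o']
  else none

-- itertools.product(*lists), as Python enumerates it (rightmost varies fastest)
def pvProd : List (List Char) → List (List Char)
  | [] => [[]]
  | l :: ls => l.flatMap (fun x => (pvProd ls).map (fun v => x :: v))

def generate_1li_combinations (word : String) : List String :=
  let cs := word.toList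
  let positions := ((PySem.List.enumerate cs).filter (fun p => (pvSubs? p.2).isSome)).map (·.1)
  if positions = [] then [word]
  else
    (pvProd (positions.map (fun pos => (pvSubs? (PySem.List.pyGetD cs pos ' ')).getD []))).map
      (fun variant =>
        String.ofList ((positions.zip variant).foldl
          (fun w px => PySem.List.pySetD w px.1 px.2) cs))

-- ===== PORT B =====
def generate_1li_combinations_alt (word : String) : List String :=
  word.toList.foldl
    (fun acc c => acc.flatMap (fun p => ((pvSubs? c).getD [c]).map (fun s => p.push s)))
    [""]

-- ===== PRECONDITION & SPEC =====
def Spec_generate_1li_combinations (word : String) (out : List String) : Prop := out = generate_1li_combinations_alt word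
instance (word : String) (out : List String) : Decidable (Spec_generate_1li_combinations word out) := by unfold Spec_generate_1li_combinations; infer_instance

-- ===== CLAIM (what is proved, stated in full; the proofs are below) =====
def Claim_equal_generate_1li_combinations : Prop := ∀ (word : String), Dom_generate_1li_combinations word → Spec_generate_1li_combinations word (generate_1li_combinations word)

-- ===== LEMMAS AND PROOFS =====

-- the full per-character cartesian product both programs enumerate
def pvG : List Char → List (List Char)
  | [] => [[]]
  | c :: cs => ((pvSubs? c).getD [c]).flatMap (fun x => (pvG cs).map (fun v => x :: v))

def pvPositions (cs : List Char) : List Int :=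
  ((PySem.List.enumerate cs).filter (fun p => (pvSubs? p.2).isSome)).map (·.1)

lemma pvEnum_shift (xs : List Char) (s t : Int) :
    PySem.List.enumerate xs (s + t) = (PySem.List.enumerate xs s).map (fun p => (p.1 + t, p.2)) := by
  induction xs generalizing s with
  | nil => simp [PySem.List.enumerate_nil]
  | cons x xs ih =>
    simp only [PySem.List.enumerate_cons, List.map_cons]
    have h : s + t + 1 = (s + 1) + t := by ring
    rw [h, ih]

lemma pvPositions_cons (c : Char) (cs : List Char) :
    pvPositions (c :: cs) =
      (if (pvSubs? c).isSome then [(0 : Int)] else []) ++ (pvPositions cs).map (· + 1) := by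
  unfold pvPositions
  rw [PySem.List.enumerate_cons]
  have he : PySem.List.enumerate cs (0 + 1) =
      (PySem.List.enumerate cs 0).map (fun p => (p.1 + 1, p.2)) := pvEnum_shift cs 0 1
  rw [he]
  rw [List.filter_cons]
  by_cases h : (pvSubs? c).isSome
  · simp [h, List.filter_map, List.map_map, Function.comp_def]
  · simp [h, List.filter_map, List.map_map, Function.comp_def]

lemma pvPositions_nonneg (cs : List Char) : ∀ q ∈ pvPositions cs, 0 ≤ q := by
  induction cs with
  | nil => simp [pvPositions, PySem.List.enumerate_nil]
  | cons c cs ih =>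
    intro q hq
    rw [pvPositions_cons] at hq
    rcases List.mem_append.mp hq with h | h
    · split_ifs at h <;> simp_all
    · rcases List.mem_map.mp h with ⟨p, hp, rfl⟩
      have := ih p hp; omega

-- applying a variant at shifted positions leaves the head alone
lemma pvApply_shift (c : Char) (ps : List Int) (v : List Char) (w : List Char)
    (hps : ∀ q ∈ ps, 0 ≤ q) :
    ((ps.map (· + 1)).zip v).foldl (fun w px => PySem.List.pySetD w px.1 px.2) (c :: w)
      = c :: (ps.zip v).foldl (fun w px => PySem.List.pySetD w px.1 px.2) w := by
  induction ps generalizing v w with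
  | nil => simp
  | cons p ps ih =>
    cases v with
    | nil => simp
    | cons x v =>
      have hp : 0 ≤ p := hps p (by simp)
      have hn : (p + 1).toNat = p.toNat + 1 := by omega
      have hset : PySem.List.pySetD (c :: w) (p + 1) x = c :: PySem.List.pySetD w p x := by
        rw [PySem.List.pySetD_of_nonneg _ x (by omega), PySem.List.pySetD_of_nonneg _ x hp, hn]
        rfl
      simp only [List.map_cons, List.zip_cons_cons, List.foldl_cons, hset]
      exact ih v _ (fun q hq => hps q (by simp [hq]))

lemma pvGetD_shift (c : Char) (cs : List Char) (p : Int) (hp : 0 ≤ p) :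
    PySem.List.pyGetD (c :: cs) (p + 1) ' ' = PySem.List.pyGetD cs p ' ' := by
  obtain ⟨n, rfl⟩ := Int.eq_ofNat_of_zero_le hp
  have h : ((n : Int) + 1) = ((n + 1 : Nat) : Int) := by push_cast; ring
  rw [h, PySem.List.pyGetD_natCast, PySem.List.pyGetD_natCast]
  simp

-- A's core (product over substitutable positions, re-assembled by index assignment)
-- equals the full per-character product pvG
lemma pvA_core (cs : List Char) :
    (pvProd ((pvPositions cs).map
        (fun pos => (pvSubs? (PySem.List.pyGetD cs pos ' ')).getD []))).map
      (fun variant => ((pvPositions cs).zip variant).foldl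
        (fun w px => PySem.List.pySetD w px.1 px.2) cs)
      = pvG cs := by
  induction cs with
  | nil =>
    simp [pvPositions, PySem.List.enumerate_nil, pvProd, pvG]
  | cons c cs ih =>
    have hshift : ((pvPositions cs).map (· + 1)).map
        (fun pos => (pvSubs? (PySem.List.pyGetD (c :: cs) pos ' ')).getD [])
        = (pvPositions cs).map
            (fun pos => (pvSubs? (PySem.List.pyGetD cs pos ' ')).getD []) := by
      rw [List.map_map]
      apply List.map_congr_left
      intro p hp
      simp [Function.comp, pvGetD_shift c cs p (pvPositions_nonneg cs p hp)]
    have hget0 : PySem.List.pyGetD (c :: cs) (0 : Int) ' ' = c := by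
      have h0 : (0 : Int) = ((0 : Nat) : Int) := by norm_num
      rw [h0, PySem.List.pyGetD_natCast]; simp
    have hset0 : ∀ x : Char, PySem.List.pySetD (c :: cs) (0 : Int) x = x :: cs := by
      intro x
      rw [PySem.List.pySetD_of_nonneg _ x (by norm_num)]; rfl
    by_cases h : (pvSubs? c).isSome
    · -- c substitutable: head list is subs[c], product peels it off
      obtain ⟨l, hl⟩ := Option.isSome_iff_exists.mp h
      rw [pvPositions_cons]
      simp only [h, if_pos, List.singleton_append, List.map_cons, hget0, hshift]
      simp only [pvProd, pvG, hl, Option.getD_some, List.map_flatMap, List.map_map]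
      apply List.flatMap_congr
      intro x _
      rw [← ih, List.map_map]
      apply List.map_congr_left
      intro v _
      simp only [Function.comp_apply, List.zip_cons_cons, List.foldl_cons, hset0 x]
      exact pvApply_shift x (pvPositions cs) v cs (pvPositions_nonneg cs)
    · -- c fixed: positions just shift, the head char is copied through
      have hopts : (pvSubs? c).getD [c] = [c] := by
        cases hs : pvSubs? c with
        | none => simp
        | some l => rw [hs] at h; simp at h
      rw [pvPositions_cons]
      simp only [h, if_neg, Bool.false_eq_true, not_false_iff, List.nil_append, hshift]
      simp only [pvG, hopts, List.flatMap_cons, List.flatMap_nil, List.append_nil]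
      rw [← ih, List.map_map]
      apply List.map_congr_left
      intro v _
      simp only [Function.comp_apply]
      exact pvApply_shift c (pvPositions cs) v cs (pvPositions_nonneg cs)

-- B's fold crosses the accumulator with the remaining product
lemma pvB_fold (cs : List Char) (acc : List String) :
    cs.foldl (fun acc c => acc.flatMap (fun p => ((pvSubs? c).getD [c]).map (fun s => p.push s))) acc
      = acc.flatMap (fun p => (pvG cs).map (fun v => String.ofList (p.toList ++ v))) := by
  induction cs generalizing acc with
  | nil =>
    simp [pvG, String.ofList_toList]
  | cons c cs ih =>
    simp only [List.foldl_cons]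
    rw [ih]
    simp only [pvG, List.flatMap_assoc, List.flatMap_map, List.map_flatMap, List.map_map]
    apply List.flatMap_congr
    intro p _
    apply List.flatMap_congr
    intro x _
    apply List.map_congr_left
    intro v _
    simp [Function.comp, String.toList_push]
lemma pvG_of_no_positions (cs : List Char) (h : pvPositions cs = []) : pvG cs = [cs] := by
  have hc := pvA_core cs
  rw [h] at hc
  simpa [pvProd] using hc.symm

-- ===== VERDICT (by name: the statement is the Claim_ definition above) =====
theorem generate_1li_combinations_spec : Claim_equal_generate_1li_combinations := by
  intro word _
  show generate_1li_combinations word = generate_1li_combinations_alt word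
  simp only [generate_1li_combinations, generate_1li_combinations_alt]
  rw [pvB_fold word.toList [""]]
  have hb : ([""] : List String).flatMap
      (fun p => (pvG word.toList).map (fun v => String.ofList (p.toList ++ v)))
      = (pvG word.toList).map (fun v => String.ofList v) := by
    simp
  rw [hb]
  have hfold : ((PySem.List.enumerate word.toList).filter
      (fun p => (pvSubs? p.2).isSome)).map (·.1) = pvPositions word.toList := rfl
  rw [hfold]
  by_cases h : pvPositions word.toList = []
  · rw [if_pos h, pvG_of_no_positions _ h]
    simp [String.ofList_toList]
  · rw [if_neg h, ← pvA_core word.toList, List.map_map]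
    rfl
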